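-- pv_equiv track=rewrite | github.com/SSWConsulting/SSW.Website | content/seo_description_filler.py | find_term_line_numbers
-- ===== SOURCE A (Python) =====
-- def find_term_line_numbers(terms: list[str], lines:list[str] ) -> dict:
--     # using a dictionary to reduce the number of times the array must be traversed
--     search_term_locations : dict = {}
--     for term in terms:
--        search_term_locations[term] = -1
--     for line_index, line in enumerate(lines):
--        # nested loops are yucky
--         for term in terms:
--           if line.startswith(term):
--             search_term_locations[term] = line_index
--     return search_term_locations
-- ===== SOURCE B (Python) =====
-- def find_term_line_numbers(terms: list[str], lines: list[str]) -> dict: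
--     # one backward scan per term, stopping at the first (i.e. last) matching line
--     rev = list(enumerate(lines))
--     rev.reverse()
--     result = {}
--     for term in terms:
--         idx = -1
--         for i, line in rev:
--             if line.startswith(term):
--                 idx = i
--                 break
--         result[term] = idx
--     return result
-- ===== Notes on version B (the rewrite author's own statement) =====
-- stated objective: faster
-- what changed: Instead of a forward sweep over all lines that re-tests every term on every line and keeps overwriting a dict, B scans the reversed enumerated lines once per term and stops at the first (= last) match, so once a term's last match is found no other line is tested for it.
import Mathlib
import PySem

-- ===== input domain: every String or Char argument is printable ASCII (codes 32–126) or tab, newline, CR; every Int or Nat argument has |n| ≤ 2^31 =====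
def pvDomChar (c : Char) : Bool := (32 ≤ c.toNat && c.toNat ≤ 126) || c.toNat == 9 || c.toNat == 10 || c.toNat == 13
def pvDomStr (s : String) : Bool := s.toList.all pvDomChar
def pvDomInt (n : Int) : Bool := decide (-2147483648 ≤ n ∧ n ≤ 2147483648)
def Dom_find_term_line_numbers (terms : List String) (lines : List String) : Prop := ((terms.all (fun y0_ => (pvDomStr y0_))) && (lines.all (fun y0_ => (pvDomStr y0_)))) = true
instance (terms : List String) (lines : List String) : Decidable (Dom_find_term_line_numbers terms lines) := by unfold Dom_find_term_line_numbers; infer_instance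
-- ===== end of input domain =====

-- B replaces A's forward sweep (every term re-tested on every line, dict overwritten) by one
-- backward scan per term over the reversed enumerated lines that stops at the first (= last) match.


-- ===== PORT A =====
def find_term_line_numbers (terms : List String) (lines : List String) : List (String × Int) :=
  let d0 : PySem.Dict String Int := terms.foldl (fun d term => d.insert term (-1)) PySem.Dict.empty
  let d := (PySem.List.enumerate lines 0).foldl
    (fun d p =>
      terms.foldl (fun d term => if PySem.Str.startswith p.2 term then d.insert term p.1 else d) d)
    d0
  d.items

-- ===== PORT B =====
-- the inner 'for i, line in rev: … break' loop with default idx = -1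
def pvScanRev (term : String) : List (Int × String) → Int
  | [] => -1
  | (i, line) :: rest => if PySem.Str.startswith line term then i else pvScanRev term rest

def find_term_line_numbers_alt (terms : List String) (lines : List String) : List (String × Int) :=
  let rev := (PySem.List.enumerate lines 0).reverse
  let result : PySem.Dict String Int :=
    terms.foldl (fun d term => d.insert term (pvScanRev term rev)) PySem.Dict.empty
  result.items

-- ===== PRECONDITION & SPEC =====
def Spec_find_term_line_numbers (terms : List String) (lines : List String) (out : List (String × Int)) : Prop := out = find_term_line_numbers_alt terms lines
instance (terms : List String) (lines : List String) (out : List (String × Int)) : Decidable (Spec_find_term_line_numbers terms lines out) := by unfold Spec_find_term_line_numbers; infer_instance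

-- ===== CLAIM (what is proved, stated in full; the proofs are below) =====
def Claim_equal_find_term_line_numbers : Prop := ∀ (terms : List String) (lines : List String), Dom_find_term_line_numbers terms lines → Spec_find_term_line_numbers terms lines (find_term_line_numbers terms lines)

-- ===== LEMMAS AND PROOFS =====

-- Option-valued version of B's scan, for stating what A's line loop leaves at a key
def pvScanRev? (t : String) : List (Int × String) → Option Int
  | [] => none
  | (i, line) :: rest => if PySem.Str.startswith line t then some i else pvScanRev? t rest

theorem pvScanRev_eq_getD (t : String) (xs : List (Int × String)) :
    pvScanRev t xs = (pvScanRev? t xs).getD (-1) := by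
  induction xs with
  | nil => rfl
  | cons p rest ih =>
    obtain ⟨i, line⟩ := p
    simp only [pvScanRev, pvScanRev?]
    split <;> simp [ih]

theorem pvScanRev?_append_singleton (t : String) (xs : List (Int × String)) (p : Int × String) :
    pvScanRev? t (xs ++ [p])
      = match pvScanRev? t xs with
        | some i => some i
        | none => if PySem.Str.startswith p.2 t then some p.1 else none := by
  induction xs with
  | nil => rfl
  | cons q rest ih =>
    obtain ⟨i, line⟩ := q
    simp only [List.cons_append, pvScanRev?]
    split <;> simp [ih]

-- a fold of unconditional inserts whose value depends only on the key (B's dict loop)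
theorem pv_get?_foldl_insert (ts : List String) (g : String → Int)
    (d : PySem.Dict String Int) (t : String) :
    (ts.foldl (fun d u => d.insert u (g u)) d).get? t
      = if t ∈ ts then some (g t) else d.get? t := by
  induction ts generalizing d with
  | nil => simp
  | cons u ts ih =>
    simp only [List.foldl_cons, ih, List.mem_cons]
    by_cases hts : t ∈ ts
    · simp [hts]
    · by_cases htu : t = u
      · simp [htu, PySem.Dict.get?_insert_self]
      · simp [hts, htu, PySem.Dict.get?_insert_of_ne _ _ htu]

-- A's inner term loop at key t
theorem pv_inner_get? (ts : List String) (line : String) (i : Int)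
    (d : PySem.Dict String Int) (t : String) :
    (ts.foldl (fun d u => if PySem.Str.startswith line u then d.insert u i else d) d).get? t
      = if t ∈ ts ∧ PySem.Str.startswith line t then some i else d.get? t := by
  induction ts generalizing d with
  | nil => simp
  | cons u ts ih =>
    simp only [List.foldl_cons, ih]
    by_cases hsw : PySem.Str.startswith line t = true
    · by_cases hts : t ∈ ts
      · rw [if_pos ⟨hts, hsw⟩, if_pos ⟨List.mem_cons.2 (Or.inr hts), hsw⟩]
      · rw [if_neg (fun h => hts h.1)]
        by_cases htu : t = u
        · subst htu
          rw [if_pos hsw, PySem.Dict.get?_insert_self,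
              if_pos ⟨List.mem_cons.2 (Or.inl rfl), hsw⟩]
        · have hstep : (if PySem.Str.startswith line u = true then d.insert u i else d).get? t
              = d.get? t := by
            split
            · exact PySem.Dict.get?_insert_of_ne d i htu
            · rfl
          rw [hstep, if_neg (fun h => (List.mem_cons.1 h.1).elim htu hts)]
    · rw [if_neg (show ¬(t ∈ ts ∧ PySem.Str.startswith line t = true) from fun h => hsw h.2),
          if_neg (show ¬(t ∈ u :: ts ∧ PySem.Str.startswith line t = true) from fun h => hsw h.2)]
      split
      · next hswu =>
        have htu : t ≠ u := fun h => hsw (h ▸ hswu)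
        exact PySem.Dict.get?_insert_of_ne d i htu
      · rfl

-- A's inner term loop never changes the key list when every term is already a key
theorem pv_inner_keys (ts : List String) (line : String) (i : Int)
    (d : PySem.Dict String Int) (h : ∀ u ∈ ts, d.contains u = true) :
    (ts.foldl (fun d u => if PySem.Str.startswith line u then d.insert u i else d) d).keys
      = d.keys := by
  induction ts generalizing d with
  | nil => rfl
  | cons u ts ih =>
    simp only [List.foldl_cons]
    have hu : d.contains u = true := h u (by simp)
    have hkeys : (if PySem.Str.startswith line u then d.insert u i else d).keys = d.keys := by
      split
      · exact PySem.Dict.keys_insert_of_contains d i hu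
      · rfl
    rw [ih _ ?_, hkeys]
    intro v hv
    rw [PySem.Dict.contains_eq_decide_mem_keys, hkeys,
        ← PySem.Dict.contains_eq_decide_mem_keys]
    exact h v (by simp [hv])

-- A's outer line loop at a key t ∈ terms: the value is B's backward scan, falling back to d
theorem pv_outer_get? (terms : List String) (ps : List (Int × String))
    (d : PySem.Dict String Int) (t : String) (ht : t ∈ terms) :
    (ps.foldl (fun d p =>
        terms.foldl (fun d u => if PySem.Str.startswith p.2 u then d.insert u p.1 else d) d) d).get? t
      = match pvScanRev? t ps.reverse with
        | some i => some i
        | none => d.get? t := by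
  induction ps generalizing d with
  | nil => simp [pvScanRev?]
  | cons p ps ih =>
    simp only [List.foldl_cons, ih, List.reverse_cons, pvScanRev?_append_singleton]
    cases hscan : pvScanRev? t ps.reverse with
    | some i => rfl
    | none =>
      rw [pv_inner_get?]
      by_cases hsw : PySem.Str.startswith p.2 t = true
      · rw [if_pos ⟨ht, hsw⟩, if_pos hsw]
      · rw [if_neg (fun h => hsw h.2), if_neg hsw]

-- A's outer line loop never changes the key list when every term is already a key
theorem pv_outer_keys (terms : List String) (ps : List (Int × String))
    (d : PySem.Dict String Int) (h : ∀ u ∈ terms, d.contains u = true) :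
    (ps.foldl (fun d p =>
        terms.foldl (fun d u => if PySem.Str.startswith p.2 u then d.insert u p.1 else d) d) d).keys
      = d.keys := by
  induction ps generalizing d with
  | nil => rfl
  | cons p ps ih =>
    simp only [List.foldl_cons]
    have hkeys := pv_inner_keys terms p.2 p.1 d h
    rw [ih _ ?_, hkeys]
    intro v hv
    rw [PySem.Dict.contains_eq_decide_mem_keys, hkeys,
        ← PySem.Dict.contains_eq_decide_mem_keys]
    exact h v hv

-- ===== VERDICT (by name: the statement is the Claim_ definition above) =====
theorem find_term_line_numbers_spec : Claim_equal_find_term_line_numbers := by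
  intro terms lines _
  unfold Spec_find_term_line_numbers find_term_line_numbers find_term_line_numbers_alt
  set rev := (PySem.List.enumerate lines 0).reverse with hrev
  set d0 : PySem.Dict String Int :=
    terms.foldl (fun d term => d.insert term (-1)) PySem.Dict.empty with hd0
  set dA := (PySem.List.enumerate lines 0).foldl
    (fun d p =>
      terms.foldl (fun d term => if PySem.Str.startswith p.2 term then d.insert term p.1 else d) d)
    d0 with hdA
  set dB : PySem.Dict String Int :=
    terms.foldl (fun d term => d.insert term (pvScanRev term rev)) PySem.Dict.empty with hdB
  -- key lists
  have hk0 : d0.keys = PySem.Set.ofList terms := by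
    rw [hd0, PySem.Dict.keys_foldl_insert]
    simp [PySem.Set.update_nil_left]
  have hc0 : ∀ u ∈ terms, d0.contains u = true := by
    intro u hu
    rw [PySem.Dict.contains_eq_decide_mem_keys, hk0]
    simp [PySem.Set.mem_ofList, hu]
  have hkA : dA.keys = PySem.Set.ofList terms := by
    rw [hdA, pv_outer_keys terms _ d0 hc0, hk0]
  have hkB : dB.keys = PySem.Set.ofList terms := by
    rw [hdB, PySem.Dict.keys_foldl_insert]
    simp [PySem.Set.update_nil_left]
  have hndA : dA.keys.Nodup := by rw [hkA]; exact PySem.Set.nodup_ofList terms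
  have hndB : dB.keys.Nodup := by rw [hkB]; exact PySem.Set.nodup_ofList terms
  -- values at each key
  have hval : ∀ t ∈ terms, dA.get? t = some (pvScanRev t rev) ∧ dB.get? t = some (pvScanRev t rev) := by
    intro t ht
    constructor
    · rw [hdA, pv_outer_get? terms _ d0 t ht]
      have h0 : d0.get? t = some (-1) := by
        rw [hd0, pv_get?_foldl_insert terms (fun _ => (-1)) PySem.Dict.empty t, if_pos ht]
      rw [pvScanRev_eq_getD]
      cases hscan : pvScanRev? t rev with
      | some i => simp
      | none => simp [h0]
    · rw [hdB, pv_get?_foldl_insert terms (fun u => pvScanRev u rev) PySem.Dict.empty t, if_pos ht]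
  -- items
  rw [PySem.Dict.items_eq_map_keys dA hndA (-1), PySem.Dict.items_eq_map_keys dB hndB (-1),
      hkA, hkB]
  apply List.map_congr_left
  intro t ht
  have ht' : t ∈ terms := (PySem.Set.mem_ofList terms t).1 ht
  obtain ⟨hA, hB⟩ := hval t ht'
  rw [PySem.Dict.getD_of_get?_eq_some dA (-1) hA, PySem.Dict.getD_of_get?_eq_some dB (-1) hB]
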